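/- GENERATED by mk_final_copies.py from the proof of the farm's unit `codebook_decode_deinterleave_repeat.1` (farm:codebook_decode_deinterleave_repeat.1.2: Proof.lean) as the
   re-elaboration sweep compiled it — do not edit. -/
import Asan.CheckWalk
import Vorbis.Spec.ReaderLemmas
import Vorbis.Spec.Units.codebook_decode_deinterleave_repeat_1
import Vorbis.Spec.Worked.codebook_decode_deinterleave_repeat_1_Lemmas

open X86 X86.User Asan Vorbis Vorbis.Spec Vorbis.Spec.Deint Vorbis.Spec.codebook_decode_deinterleave_repeat_1

set_option maxRecDepth 4000
set_option maxHeartbeats 4000000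

/-- Segment 1 of `codebook_decode_deinterleave_repeat` (10DBC0H … 10DC3CH; C lines 1893 – 1899): the prologue (six pushes,
`sub rsp, 38H`, the spills), the checked loads of `*c_inter_p`, `*p_inter_p`, `c->dimensions`, the `lookup_type` test. Exits:
the head of `while (total_decode > 0)` (10DE09H) with the assertion `AtHead` BUILT from the walker's facts, or — `lookup_type = 0` —
the epilogue (10DC9EH) with eax = 0 after `error(f, 21)`. The memory facts of the exits (`Bits f`, the book, the table, the two
ints through the stores into the own frame) are the lemmas of Lemmas.lean. -/
theorem Vorbis.Spec.Worked.codebook_decode_deinterleave_repeat_1_ok : Vorbis.Spec.codebook_decode_deinterleave_repeat_1.Statement := by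
  intro Lay hLay μ hμ u₀ hcode hload4 hload1 herror others frames Blk len ret e he hpre
  have he0 := he
  simp only [vspec] at he
  v_entry he
  have herr := herror others frames
  have hsh := hpre.book.reader.shadow
  have hsp := hsh.rsp
  have htop : 0x700000 < (e.reg .rsp).toNat + 8 := by omega
  -- where the two ints, the book and `*f` are: one arithmetic fact each
  have wcp := site_where hsh.inv hsh.offText htop hpre.cpSite
  have wpp := site_where hsh.inv hsh.offText htop hpre.ppSite
  have hL := hpre.book.reader.env.live
  obtain ⟨B, hB, hBin⟩ := hpre.book.book
  have hcsite : Site (Live (stackObjs frames ++ others)) (e.reg .rsi).toNat Off.sizeof.Codebook :=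
    Codebook.site_field hL hB hBin 0 Off.sizeof.Codebook (Nat.le_refl _) (by decide) rfl
  have wc := site_where hsh.inv hsh.offText htop hcsite
  simp only [Off.sizeof.Codebook] at wc
  have wf := hpre.book.reader.where_obj
  simp only [L.textHi] at wcp wpp wc
  -- the four loads of the segment, NAMED before the walk (10DBEDH, 10DBF9H, 10DC04H, 10DC12H)
  have hci : e.mem.readLE (e.reg .r8) 4 = (e.mem.i32 (e.reg .r8).toNat).toNat := by
    have h0 := hpre.inter.c_nonneg
    have hc := e.mem.i32_cases (e.reg .r8).toNat
    rw [readLE4_reg]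
    omega
  have hpi : e.mem.readLE (e.reg .r9) 4 = (e.mem.i32 (e.reg .r9).toNat).toNat := by
    have h0 := hpre.inter.p_nonneg
    have hc := e.mem.i32_cases (e.reg .r9).toNat
    rw [readLE4_reg]
    omega
  have hdim1 : 1 ≤ Codebook.dimensions e.mem (e.reg .rsi).toNat := hpre.book.cb.K1.dim_pos
  have hdim2 : Codebook.dimensions e.mem (e.reg .rsi).toNat ≤ 65535 := hpre.book.cb.K1.dim_le
  have hdim : e.mem.readLE (e.reg .rsi) 4 = dimOf e := by
    have hc := e.mem.i32_cases (e.reg .rsi).toNat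
    rw [readLE4_reg]
    show e.mem.u32 (e.reg .rsi).toNat = (Codebook.dimensions e.mem (e.reg .rsi).toNat).toNat
    simp only [vacc, voff, Nat.add_zero] at hdim1 ⊢
    omega
  have hlt : e.mem.readLE (e.reg .rsi + 25) 1 = Codebook.lookup_type e.mem (cOf e) := by
    simp only [vacc, voff]
    exact readLE1_reg_add e.mem (e.reg .rsi) 25
  u_walk hcode [hμ.vendor] until [Vorbis.L.codebook_decode_deinterleave_repeat.cut9, Vorbis.L.codebook_decode_deinterleave_repeat.cut3] span [Vorbis.L.textLo, Vorbis.L.textHi] side (v_side)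
  · -- 10DBE8H, line 1894 `*c_inter_p`: the check of the load
    have hun : ShadowUntouched e.mem s_10dbe8.mem := by v_untouched
    exact check_site hsh.inv hun hpre.cpSite rfl
  · -- 10DBF4H, line 1895 `*p_inter_p`
    have hun : ShadowUntouched e.mem s_10dbf4.mem := by v_untouched
    exact check_site hsh.inv hun hpre.ppSite rfl
  · -- 10DBFFH, line 1896 `c->dimensions`: a field of the struct at `c`
    have hun : ShadowUntouched e.mem s_10dbff.mem := by v_untouched
    have hs : Site (Live (stackObjs frames ++ others)) ((e.reg .rsi).toNat + 0) 4 :=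
      Codebook.site_field hL hB hBin 0 4 (by decide) (by decide) rfl
    exact check_site hsh.inv hun hs rfl
  · -- 10DC0DH, line 1899 `c->lookup_type`
    have hun : ShadowUntouched e.mem s_10dc0d.mem := by v_untouched
    have hs : Site (Live (stackObjs frames ++ others)) ((e.reg .rsi).toNat + 25) 1 :=
      Codebook.site_field hL hB hBin 25 1 (by decide) (by decide) rfl
    exact check_site hsh.inv hun hs (by u_omega)
  · -- 10DC37H, the call of `error(f, VORBIS_invalid_stream)`: the ABI invariant
    v_inv
  · -- … and its precondition: the shadow clause, `*f` inside one live object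
    show ShadowPre others frames s_10dc37 ∧ LiveIn others frames (s_10dc37.reg .rdi).toNat Off.sizeof.stb_vorbis
    refine ⟨hsh.callee ?_ ?_ ?_ ?_, ?_⟩
    · v_untouched
    · rw [w_rsp]
      u_omega
    · rw [w_rsp]
      u_omega
    · rw [w_rsp]
      u_omega
    · rw [w_rdi]
      exact hpre.book.reader.env.obj
  · -- after `error`: 10DC3CH `jmp 10dc9e`, the epilogue with eax = 0
    have w_eq := Vorbis.conv_code_eqOn w_code
    have w_df := (show X86.User.abiInv _ from w_inv).1
    have w_mx := (show X86.User.abiInv _ from w_inv).2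
    have w_sse := Vorbis.sseOK_of_abiInv w_inv
    simp only [X86.User.Spec.footprint, vspec, w_rsp_10dc37, w_rdi_10dc37] at w_same
    obtain ⟨hrax, hunr, herrv⟩ := w_post
    -- the return address and the six saved registers: in their slots before the call, untouched by the callee
    have hp0 : UInt64.ofNat (s_10dc37.mem.readLE (e.reg .rsp) 8) = ret := by u_resolve
    have hp1 : UInt64.ofNat (s_10dc37.mem.readLE (e.reg .rsp - 8) 8) = e.reg .r15 := by u_resolve
    have hp2 : UInt64.ofNat (s_10dc37.mem.readLE (e.reg .rsp - 16) 8) = e.reg .r14 := by u_resolve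
    have hp3 : UInt64.ofNat (s_10dc37.mem.readLE (e.reg .rsp - 24) 8) = e.reg .r13 := by u_resolve
    have hp4 : UInt64.ofNat (s_10dc37.mem.readLE (e.reg .rsp - 32) 8) = e.reg .r12 := by u_resolve
    have hp5 : UInt64.ofNat (s_10dc37.mem.readLE (e.reg .rsp - 40) 8) = e.reg .rbp := by u_resolve
    have hp6 : UInt64.ofNat (s_10dc37.mem.readLE (e.reg .rsp - 48) 8) = e.reg .rbx := by u_resolve
    have hs0 : UInt64.ofNat (s_10dc37r.mem.readLE (e.reg .rsp) 8) = ret := by u_frame hp0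
    have hs1 : UInt64.ofNat (s_10dc37r.mem.readLE (e.reg .rsp - 8) 8) = e.reg .r15 := by u_frame hp1
    have hs2 : UInt64.ofNat (s_10dc37r.mem.readLE (e.reg .rsp - 16) 8) = e.reg .r14 := by u_frame hp2
    have hs3 : UInt64.ofNat (s_10dc37r.mem.readLE (e.reg .rsp - 24) 8) = e.reg .r13 := by u_frame hp3
    have hs4 : UInt64.ofNat (s_10dc37r.mem.readLE (e.reg .rsp - 32) 8) = e.reg .r12 := by u_frame hp4
    have hs5 : UInt64.ofNat (s_10dc37r.mem.readLE (e.reg .rsp - 40) 8) = e.reg .rbp := by u_frame hp5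
    have hs6 : UInt64.ofNat (s_10dc37r.mem.readLE (e.reg .rsp - 48) 8) = e.reg .rbx := by u_frame hp6
    clear hp0 hp1 hp2 hp3 hp4 hp5 hp6
    -- the footprint so far: the own frame (with `error`'s) and `f->error`
    rw [w_mem_10dc37] at w_same
    have hsame : Mem.SameExcept [⟨(e.reg .rsp).toNat - 160, (e.reg .rsp).toNat⟩,
        ⟨(e.reg .rdi).toNat + 140, (e.reg .rdi).toNat + 140 + 4⟩] e.mem s_10dc37r.mem := by
      u_same
    have hun : ShadowUntouched e.mem s_10dc37r.mem := by v_untouched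
    u_walk hcode [hμ.vendor] until [Vorbis.L.codebook_decode_deinterleave_repeat.cut9, Vorbis.L.codebook_decode_deinterleave_repeat.cut3] span [Vorbis.L.textLo, Vorbis.L.textHi] side (v_side)
    -- 10DC9EH: the exit assertion `AtEpilogue`
    refine ReachVia.done (Or.inr ?_)
    obtain ⟨hrd, hcI, hpI⟩ := reader_ints hpre htop hsame (frame_error_windows e he_room)
    refine ⟨w_rip, ⟨he0, w_rsp, ?_, ?_, ?_, ?_, ?_, ?_, ?_, ?_, w_eq, ?_, ?_⟩, ?_, Or.inl w_rax, ?_, ?_⟩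
    · rw [w_mem]
      exact hs0
    · rw [w_mem]
      exact hs1
    · rw [w_mem]
      exact hs2
    · rw [w_mem]
      exact hs3
    · rw [w_mem]
      exact hs4
    · rw [w_mem]
      exact hs5
    · rw [w_mem]
      exact hs6
    · -- the footprint: the own frame and `f->error`, both inside the contract's
      rw [w_mem]
      exact same_footprint (by decide) hsame
    · -- DF and the MXCSR masks: the callee's `abiInv`, the `jmp` changes neither
      refine Vorbis.abiInv_of ?_ ?_
      · rw [w_flags]
        exact w_df
      · rw [w_mxcsr]
        exact w_mx
    · rw [w_mem]
      exact hun
    · -- `Bits f`, μ: `error` wrote `f->error` only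
      rw [w_mem]
      exact hrd
    · -- eax = 0, not 1
      intro h1
      rw [w_rax] at h1
      exact absurd h1 (by decide)
    · -- the two ints were not written
      intro _
      rw [w_mem]
      exact ⟨hcI, hpI⟩
  · -- 10DE09H, the head of `while (total_decode > 0)`: the assertion `AtHead`
    refine ReachVia.done (Or.inl ⟨(e.mem.i32 (e.reg .r8).toNat).toNat, (e.mem.i32 (e.reg .r9).toNat).toNat,
      e.mem.i32 ((e.reg .rsp).toNat + 16), ?_⟩)
    -- the stores so far: all inside the own frame
    have hsame1 : Mem.SameExcept [⟨(e.reg .rsp).toNat - 160, (e.reg .rsp).toNat⟩] e.mem s_10dc28.mem := by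
      u_same
    have hsame : Mem.SameExcept [⟨(e.reg .rsp).toNat - 160, (e.reg .rsp).toNat⟩,
        ⟨(e.reg .rdi).toNat + 140, (e.reg .rdi).toNat + 140 + 4⟩] e.mem s_10dc28.mem := by
      u_same
    obtain ⟨hrd, hcI, hpI⟩ := reader_ints hpre htop hsame (frame_error_windows e he_room)
    obtain ⟨hcb, hap, hsf, htab⟩ := book_table hpre htop hsame1 (frame_window e he_room)
    have hinv := head_inv hpre
    have hcr := e.mem.i32_range (e.reg .r8).toNat
    have hpr := e.mem.i32_range (e.reg .r9).toNat
    refine ⟨w_rip, ⟨⟨he0, w_rsp, ?ra, ?r15, ?r14, ?r13, ?r12, ?rbp, ?rbx, same_footprint (by decide) hsame, w_eq, ?abi, ?unt⟩,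
      hpre, hrd, hcb, hap, hsf, ?type2, w_r12, ?chSlot, ?outsSlot, ?fSlot, ?cpSlot, ?ppSlot, ?lenSlot, htab, hcI, hpI⟩,
      ⟨?ciReg, ?piSlot, ?effReg, ?tdSlot⟩, hinv⟩
    case abi => v_inv
    case unt => v_untouched
    case type2 =>
      -- the test at 10DC12H and K6
      rw [hsf.lookup_type]
      exact type2_of_ne hpre.book.cb hbr_10dc18
    case ciReg =>
      rw [w_rbp]
      exact word_of_dword _ (by omega)
    case effReg =>
      rw [w_r15]
      refine word_of_dword _ ?_
      show (Codebook.dimensions e.mem (e.reg .rsi).toNat).toNat < 2 ^ 32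
      omega
    case chSlot =>
      -- `[rsp+0CH]` = ecx, stored at 10DBDBH
      u_resolve
      rw [Vorbis.toNat_part32]
      show (e.reg .rcx).toNat % 2 ^ 32 % 4294967296 = (e.reg .rcx).toNat % 2 ^ 32
      omega
    case piSlot =>
      -- `[rsp+8]` = ebx = `*p_inter_p`, stored at 10DC1AH
      u_resolve
      rw [BitVec.toNat_ofNat]
      omega
    case lenSlot =>
      -- `[rsp+70H]`: the first argument slot, above the return address, never written
      have h0 : e.mem.readLE (e.reg .rsp + 8) 4 = lenOf e := (lenOf_eq e).symm
      u_frame h0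
    case tdSlot =>
      -- `[rsp+78H]`: the second argument slot, not written by this segment
      have h0 : e.mem.readLE (e.reg .rsp + 16) 4 = e.mem.readLE (e.reg .rsp + 16) 4 := rfl
      have h1 : s_10dc28.mem.readLE (e.reg .rsp + 16) 4 = e.mem.readLE (e.reg .rsp + 16) 4 := by
        u_frame h0
      rw [h1]
      exact (total_eq e).symm
    all_goals u_resolve
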